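-- pv_equiv track=rewrite | github.com/tonyngmk/leetcode | python/1065_index_pairs_of_a_string/1065_hash_set.py | indexPairs
-- ===== SOURCE A (Python) =====
-- from typing import List
--
-- def indexPairs(text: str, words: List[str]) -> List[List[int]]:
--
--     words = set(words)
--     ans = []
--     n = len(text)
--     for i in range(n):
--         for word in words:
--             n_word = len(word)
--             if (i + n_word - 1) < n and word[0] == text[i] and text[i:i+n_word] == word:
--                 ans.append([i, i+n_word-1])
--
--     ans.sort(key = lambda x: (x[0], x[1]))
--     return ans
-- ===== SOURCE B (Python) =====
-- from typing import List
--
-- def indexPairs(text: str, words: List[str]) -> List[List[int]]: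
--     ws = set(words)
--     lens = sorted({len(w) for w in ws})
--     n = len(text)
--     ans = []
--     for i in range(n):
--         for L in lens:
--             if i + L <= n and text[i:i+L] in ws:
--                 ans.append([i, i + L - 1])
--     return ans
-- ===== Notes on version B (the rewrite author's own statement) =====
-- stated objective: faster
-- what changed: Instead of scanning every word at every start index and sorting at the end, B iterates over the sorted set of distinct word LENGTHS at each index and tests the substring by hash-set membership, emitting pairs already in sorted order (no final sort).
import Mathlib
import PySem

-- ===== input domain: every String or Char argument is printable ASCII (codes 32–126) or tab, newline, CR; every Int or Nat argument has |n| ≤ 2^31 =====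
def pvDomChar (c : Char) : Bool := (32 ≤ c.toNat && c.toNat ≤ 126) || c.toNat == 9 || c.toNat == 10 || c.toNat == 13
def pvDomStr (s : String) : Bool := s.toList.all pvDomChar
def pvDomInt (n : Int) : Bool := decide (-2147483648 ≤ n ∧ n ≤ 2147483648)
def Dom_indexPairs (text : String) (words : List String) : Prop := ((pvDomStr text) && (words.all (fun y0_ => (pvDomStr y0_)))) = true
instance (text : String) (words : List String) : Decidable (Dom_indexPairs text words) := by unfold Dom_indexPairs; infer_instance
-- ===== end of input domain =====

-- B replaces A's per-index scan over all words followed by a final sort with a per-index walk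
-- over the sorted distinct word lengths plus a set membership test on the substring, emitting
-- the pairs already in sorted order (no final sort).

-- ===== PORT A =====
def indexPairs (text : String) (words : List String) : List (List Int) :=
  let wordsSet : PySem.Set String := PySem.Set.ofList words
  let n : Int := PySem.Str.len text
  let ans : List (List Int) :=
    (PySem.List.pyRange 0 n 1).foldl (fun ans i =>
      wordsSet.foldl (fun ans word =>
        let nWord : Int := PySem.Str.len word
        -- word[0] raises IndexError in Python when word = "": Pre_ excludes that; here the
        -- Option comparison is simply false there.
        if ((i + nWord - 1 < n) && (PySem.Str.pyGet? word 0 == PySem.Str.pyGet? text i)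
             && (PySem.Str.slice text (some i) (some (i + nWord)) == word))
        then ans ++ [[i, i + nWord - 1]] else ans) ans) []
  -- ans.sort(key = lambda x: (x[0], x[1])); the elements are always 2-lists, so pyGetD is exact
  PySem.List.sorted2 ans (fun x => PySem.List.pyGetD x 0 0) (fun x => PySem.List.pyGetD x 1 0)

-- ===== PORT B =====
def indexPairs_alt (text : String) (words : List String) : List (List Int) :=
  let ws : PySem.Set String := PySem.Set.ofList words
  let lens : List Int :=
    PySem.List.sorted (PySem.Set.ofList (ws.map (fun w => PySem.Str.len w))) (fun x => x)
  let n : Int := PySem.Str.len text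
  (PySem.List.pyRange 0 n 1).foldl (fun ans i =>
    lens.foldl (fun ans L =>
      if ((i + L ≤ n) && PySem.Set.contains ws (PySem.Str.slice text (some i) (some (i + L))))
      then ans ++ [[i, i + L - 1]] else ans) ans) []

-- ===== PRECONDITION & SPEC =====
-- Pre_ excludes only the inputs where A raises IndexError: a nonempty text together with an
-- empty string among the words (word[0] is evaluated for every word at every index).
def Pre_indexPairs (text : String) (words : List String) : Prop :=
  text.toList = [] ∨ "" ∉ words
instance (text : String) (words : List String) : Decidable (Pre_indexPairs text words) := by
  unfold Pre_indexPairs; infer_instance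
def pvWitness_indexPairs : String × List String := ("ababa", ["aba", "ab", "a"])

def Spec_indexPairs (text : String) (words : List String) (out : List (List Int)) : Prop :=
  out = indexPairs_alt text words
instance (text : String) (words : List String) (out : List (List Int)) :
    Decidable (Spec_indexPairs text words out) := by unfold Spec_indexPairs; infer_instance

-- ===== CLAIM (what is proved, stated in full; the proofs are below) =====
def Claim_equal_indexPairs : Prop := ∀ (text : String) (words : List String),
  Dom_indexPairs text words → Pre_indexPairs text words →
  Spec_indexPairs text words (indexPairs text words)

-- ===== LEMMAS AND PROOFS =====

def condA (text : String) (n i : Int) (w : String) : Bool :=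
  (i + PySem.Str.len w - 1 < n) && (PySem.Str.pyGet? w 0 == PySem.Str.pyGet? text i)
    && (PySem.Str.slice text (some i) (some (i + PySem.Str.len w)) == w)

def condB (text : String) (ws : PySem.Set String) (n i L : Int) : Bool :=
  (i + L ≤ n) && PySem.Set.contains ws (PySem.Str.slice text (some i) (some (i + L)))

lemma indexPairs_eq (text : String) (words : List String) :
    indexPairs text words =
      PySem.List.sorted2
        ((PySem.List.pyRange 0 (PySem.Str.len text) 1).flatMap (fun i =>
          (List.filter (condA text (PySem.Str.len text) i) (PySem.Set.ofList words)).map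
            (fun w => [i, i + PySem.Str.len w - 1])))
        (fun x => PySem.List.pyGetD x 0 0) (fun x => PySem.List.pyGetD x 1 0) := by
  unfold indexPairs
  simp only [PySem.List.foldl_append_if, PySem.List.foldl_append_eq_flatMap,
    List.nil_append]
  rfl

lemma indexPairs_alt_eq (text : String) (words : List String) :
    indexPairs_alt text words =
      (PySem.List.pyRange 0 (PySem.Str.len text) 1).flatMap (fun i =>
        (List.filter (condB text (PySem.Set.ofList words) (PySem.Str.len text) i)
          (PySem.List.sorted (PySem.Set.ofList ((PySem.Set.ofList words).map
            (fun w => PySem.Str.len w))) (fun x => x))).map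
          (fun L => [i, i + L - 1])) := by
  unfold indexPairs_alt
  simp only [PySem.List.foldl_append_if, PySem.List.foldl_append_eq_flatMap,
    List.nil_append]
  rfl

lemma sorted2_eq_sorted_lex {α : Type} (xs : List α) (k1 k2 : α → Int) :
    PySem.List.sorted2 xs k1 k2 =
      PySem.List.sorted xs (fun x => toLex (k1 x, k2 x)) := by
  have hb : (fun (a b : α) => decide (k1 a < k1 b) || (!decide (k1 b < k1 a) && decide (k2 a < k2 b)))
      = (fun a b => decide (toLex (k1 a, k2 a) < toLex (k1 b, k2 b))) := by
    funext a b
    by_cases h1 : k1 a < k1 b <;> by_cases h2 : k1 b < k1 a <;> by_cases h3 : k2 a < k2 b <;>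
      simp [h1, h2, h3, Prod.Lex.toLex_lt_toLex] <;> omega
  simp only [PySem.List.sorted2, PySem.List.sorted, if_neg (by decide : ¬ (false = true))]
  rw [hb]

lemma str_eq_iff (s t : String) : s = t ↔ s.toList = t.toList := String.toList_inj.symm

lemma slice_toList (text : String) (k m : Nat) :
    (PySem.Str.slice text (some (k : Int)) (some ((k : Int) + (m : Int)))).toList =
      (text.toList.drop k).take m := by
  simp [PySem.Str.slice, PySem.List.slice_natCast_add]

lemma pyGet_text (text : String) (k : Nat) (hk : k < text.toList.length) :
    PySem.Str.pyGet? text (k : Int) = some (text.toList[k]) := by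
  simp [PySem.Str.pyGet?, PySem.List.pyGet?_natCast, List.getElem?_eq_getElem hk]

lemma condA_iff (text w : String) (k : Nat) (hk : k < text.toList.length) :
    condA text (PySem.Str.len text) (k : Int) w = true ↔
      w.toList ≠ [] ∧ k + w.toList.length ≤ text.toList.length ∧
        (text.toList.drop k).take w.toList.length = w.toList := by
  unfold condA
  simp only [Bool.and_eq_true, decide_eq_true_eq, beq_iff_eq, PySem.Str.len_eq]
  constructor
  · rintro ⟨⟨h1, h2⟩, h3⟩
    have hsl : (text.toList.drop k).take w.toList.length = w.toList := by
      rw [← slice_toList text k w.toList.length, h3]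
    refine ⟨?_, by omega, hsl⟩
    intro hnil
    rw [pyGet_text text k hk] at h2
    simp [PySem.Str.pyGet?, hnil, PySem.List.pyGet?] at h2
  · rintro ⟨h0, h2, h3⟩
    have hm : 0 < w.toList.length := List.length_pos_iff.mpr h0
    refine ⟨⟨by omega, ?_⟩, ?_⟩
    · rw [pyGet_text text k hk]
      have : w.toList[0]? = some (text.toList[k]) := by
        conv_lhs => rw [← h3]
        rw [List.getElem?_take_of_lt hm, List.getElem?_drop]
        simp [List.getElem?_eq_getElem hk]
      simp [PySem.Str.pyGet?, PySem.List.pyGet?_zero, this]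
    · rw [str_eq_iff, slice_toList, h3]

-- the sorted distinct-length list of B
def lensOf (words : List String) : List Int :=
  PySem.List.sorted (PySem.Set.ofList ((PySem.Set.ofList words).map (fun w => PySem.Str.len w)))
    (fun x => x)

lemma mem_lensOf (words : List String) (L : Int) :
    L ∈ lensOf words ↔ ∃ w, w ∈ words ∧ PySem.Str.len w = L := by
  unfold lensOf
  simp [PySem.List.mem_sorted, PySem.Set.mem_ofList, List.mem_map]

lemma mem_filter_iff (text : String) (words : List String) (k : Nat)
    (hk : k < text.toList.length) (hnw : "" ∉ words) (L : Int) :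
    L ∈ (lensOf words).filter (condB text (PySem.Set.ofList words) (PySem.Str.len text) (k : Int))
      ↔ L ∈ ((PySem.Set.ofList words).filter
              (condA text (PySem.Str.len text) (k : Int))).map (fun w => PySem.Str.len w) := by
  simp only [List.mem_filter, List.mem_map, mem_lensOf, PySem.Set.mem_ofList]
  constructor
  · rintro ⟨⟨w0, hw0, rfl⟩, hcB⟩
    unfold condB at hcB
    simp only [Bool.and_eq_true, decide_eq_true_eq, PySem.Set.contains_iff,
      PySem.Set.mem_ofList, PySem.Str.len_eq] at hcB
    obtain ⟨hle, hmem⟩ := hcB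
    set m := w0.toList.length with hm
    set w := PySem.Str.slice text (some (k : Int)) (some ((k : Int) + (m : Int))) with hw
    have hwl : w.toList = (text.toList.drop k).take m := slice_toList text k m
    have hlenw : w.toList.length = m := by
      rw [hwl]; rw [List.length_take, List.length_drop]; omega
    have hne : w.toList ≠ [] := by
      intro h
      have : m = 0 := by rw [← hlenw, h]; rfl
      have : w0.toList = [] := List.length_eq_zero_iff.mp (by omega)
      exact hnw (by rwa [show ("" : String) = w0 from String.toList_inj.mp (by simp [this])] )
    refine ⟨w, ⟨hmem, ?_⟩, ?_⟩
    · rw [condA_iff text w k hk]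
      exact ⟨hne, by rw [hlenw]; omega, by rw [hlenw, hwl]⟩
    · rw [PySem.Str.len_eq, hlenw, hm, PySem.Str.len_eq]
  · rintro ⟨w, ⟨hw, hcA⟩, rfl⟩
    rw [condA_iff text w k hk] at hcA
    obtain ⟨h0, h2, h3⟩ := hcA
    refine ⟨⟨w, hw, rfl⟩, ?_⟩
    unfold condB
    simp only [Bool.and_eq_true, decide_eq_true_eq, PySem.Set.contains_iff,
      PySem.Set.mem_ofList, PySem.Str.len_eq]
    constructor
    · omega
    · have : PySem.Str.slice text (some (k : Int)) (some ((k : Int) + (w.toList.length : Int))) = w := by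
        rw [str_eq_iff, slice_toList, h3]
      rwa [this]

lemma nodup_lensOf (words : List String) : (lensOf words).Nodup := by
  unfold lensOf
  exact ((PySem.List.sorted_perm _ _ _).nodup_iff).mpr (PySem.Set.nodup_ofList _)

lemma perm_i (text : String) (words : List String) (k : Nat)
    (hk : k < text.toList.length) (hnw : "" ∉ words) :
    ((lensOf words).filter
        (condB text (PySem.Set.ofList words) (PySem.Str.len text) (k : Int))).Perm
      (((PySem.Set.ofList words).filter
          (condA text (PySem.Str.len text) (k : Int))).map (fun w => PySem.Str.len w)) := by
  have hn1 : ((lensOf words).filter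
      (condB text (PySem.Set.ofList words) (PySem.Str.len text) (k : Int))).Nodup :=
    (nodup_lensOf words).filter _
  have hn2 : (((PySem.Set.ofList words).filter
      (condA text (PySem.Str.len text) (k : Int))).map (fun w => PySem.Str.len w)).Nodup := by
    refine List.Nodup.map_on ?_ ((PySem.Set.nodup_ofList words).filter _)
    intro x hx y hy hxy
    rw [List.mem_filter] at hx hy
    rw [condA_iff text x k hk] at hx
    rw [condA_iff text y k hk] at hy
    have hlen : x.toList.length = y.toList.length := by
      rw [PySem.Str.len_eq, PySem.Str.len_eq] at hxy
      exact_mod_cast hxy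
    apply String.toList_inj.mp
    rw [← hx.2.2.2, ← hy.2.2.2, hlen]
  rw [List.perm_ext_iff_of_nodup hn1 hn2]
  exact mem_filter_iff text words k hk hnw

lemma pyGetD_pair1 (a b : Int) : PySem.List.pyGetD [a, b] 1 0 = b := rfl

lemma main_eq (text : String) (words : List String)
    (hpre : text.toList = [] ∨ "" ∉ words) :
    indexPairs text words = indexPairs_alt text words := by
  rw [indexPairs_eq, indexPairs_alt_eq, sorted2_eq_sorted_lex]
  rcases hpre with h | hnw
  · rw [PySem.Str.len_eq, h]
    rfl
  · rw [PySem.Str.len_eq, PySem.List.pyRange_zero_natCast (text.toList.length)]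
    rw [List.flatMap_map, List.flatMap_map]
    set N := text.toList.length with hN
    apply PySem.List.sorted_eq_of_perm_of_pairwise_lt
    · -- permutation
      refine List.Perm.flatMap (List.Perm.refl _) ?_
      intro k hk
      rw [List.mem_range] at hk
      have h := (perm_i text words k hk hnw).map (fun L => [(k : Int), (k : Int) + L - 1])
      rw [List.map_map] at h
      simp only [lensOf, PySem.Str.len_eq] at h ⊢
      exact h
    · -- strictly increasing under the lex key
      rw [List.pairwise_flatMap]
      constructor
      · intro k _
        rw [List.pairwise_map]
        have hpw : ((lensOf words).filter
            (condB text (PySem.Set.ofList words) (↑N) (k : Int))).Pairwise (· < ·) := by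
          have := PySem.List.sorted_ofList_pairwise_lt (κ := Int)
            (((PySem.Set.ofList words).map (fun w => PySem.Str.len w)))
          exact List.Pairwise.filter _ this
        refine hpw.imp ?_
        intro a b hab
        refine Prod.Lex.toLex_lt_toLex.mpr ?_
        simp [pyGetD_pair1]
        omega
      · have hpw := List.pairwise_lt_range (n := N)
        refine hpw.imp ?_
        intro a b hab x hx y hy
        rw [List.mem_map] at hx hy
        obtain ⟨La, _, rfl⟩ := hx
        obtain ⟨Lb, _, rfl⟩ := hy
        refine Prod.Lex.toLex_lt_toLex.mpr ?_
        simp [pyGetD_pair1]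
        omega

-- ===== VERDICT (by name: the statement is the Claim_ definition above) =====
theorem indexPairs_spec : Claim_equal_indexPairs := by
  intro text words _ hpre
  unfold Spec_indexPairs
  exact main_eq text words hpre
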